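-- pv_equiv track=rewrite | github.com/titanite07/autonomous-research-agent | core/extractors/equation_extractor.py | group_by_page
-- ===== SOURCE A (Python) =====
-- from typing import List, Dict, Optional
--
-- def group_by_page(equations: List[Dict]) -> Dict[int, List[Dict]]:
--     """Group equations by page number"""
--     grouped = {}
--
--     for equation in equations:
--         page = equation['page']
--         if page not in grouped:
--             grouped[page] = []
--         grouped[page].append(equation)
--
--     return grouped
-- ===== SOURCE B (Python) =====
-- def group_by_page(equations):
--     """Group equations by page number (distinct pages in first-appearance order, then one filter pass per page)."""
--     pages = list(dict.fromkeys(e['page'] for e in equations))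
--     return {p: [e for e in equations if e['page'] == p] for p in pages}
-- ===== Notes on version B (the rewrite author's own statement) =====
-- stated objective: alternative
-- what changed: B replaces A's incremental dict-building loop (membership check + append per element) with two declarative passes: first the distinct pages in first-appearance order via dict.fromkeys, then one filter comprehension per page.
import Mathlib
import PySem

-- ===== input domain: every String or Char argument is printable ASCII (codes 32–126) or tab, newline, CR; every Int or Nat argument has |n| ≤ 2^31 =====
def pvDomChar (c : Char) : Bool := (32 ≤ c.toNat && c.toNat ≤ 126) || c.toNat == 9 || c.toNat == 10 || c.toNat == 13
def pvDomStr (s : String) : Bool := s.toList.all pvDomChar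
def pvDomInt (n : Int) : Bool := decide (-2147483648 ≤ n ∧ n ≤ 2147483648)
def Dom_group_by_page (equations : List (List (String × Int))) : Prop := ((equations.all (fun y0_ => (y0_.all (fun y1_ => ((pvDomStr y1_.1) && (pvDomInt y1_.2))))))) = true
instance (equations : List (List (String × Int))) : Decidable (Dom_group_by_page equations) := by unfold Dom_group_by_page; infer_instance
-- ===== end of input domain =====

-- B groups by first collecting the distinct pages (first-appearance order) and then one filter pass per page,
-- instead of A's incremental dict-building loop; an alternative decomposition, not claimed faster.


-- ===== PORT A =====
-- equation['page'] (both Pythons do this lookup; Pre_ guarantees the key is present, so the default 0 is never read)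
def pageOf (equation : List (String × Int)) : Int :=
  PySem.Dict.getD (PySem.Dict.mk equation) "page" 0

def group_by_page (equations : List (List (String × Int))) : List (Int × List (List (String × Int))) :=
  (equations.foldl
    (fun grouped equation =>
      let page := pageOf equation
      let grouped := if grouped.contains page then grouped else grouped.insert page []
      grouped.modify page [] (fun acc => acc ++ [equation]))
    PySem.Dict.empty).items

-- ===== PORT B =====
-- pages = list(dict.fromkeys(...)) is PySem.List.dedup; then one filter pass per page
def group_by_page_alt (equations : List (List (String × Int))) : List (Int × List (List (String × Int))) :=
  let pages := PySem.List.dedup (equations.map pageOf)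
  pages.map (fun p => (p, equations.filter (fun e => pageOf e == p)))

-- ===== PRECONDITION & SPEC =====
-- A (and B) raise KeyError when some equation lacks the key 'page'; Pre_ admits exactly the inputs where every equation has it.
def Pre_group_by_page (equations : List (List (String × Int))) : Prop :=
  equations.all (fun e => (PySem.Dict.mk e).contains "page") = true
instance (equations : List (List (String × Int))) : Decidable (Pre_group_by_page equations) := by unfold Pre_group_by_page; infer_instance

def pvWitness_group_by_page : (List (List (String × Int))) := ([[("page", 1), ("id", 7)], [("page", 2)], [("page", 1)]])

def Spec_group_by_page (equations : List (List (String × Int))) (out : List (Int × List (List (String × Int)))) : Prop := out = group_by_page_alt equations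
instance (equations : List (List (String × Int))) (out : List (Int × List (List (String × Int)))) : Decidable (Spec_group_by_page equations out) := by unfold Spec_group_by_page; infer_instance

-- ===== CLAIM (what is proved, stated in full; the proofs are below) =====
def Claim_equal_group_by_page : Prop := ∀ (equations : List (List (String × Int))), Dom_group_by_page equations → Pre_group_by_page equations → Spec_group_by_page equations (group_by_page equations)

-- ===== LEMMAS AND PROOFS =====

-- the association list B computes (= group_by_page_alt equations, definitionally)
def pvSpecList (l : List (List (String × Int))) : List (Int × List (List (String × Int))) :=
  (PySem.List.dedup (l.map pageOf)).map (fun p => (p, l.filter (fun e => pageOf e == p)))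

theorem pvSpecList_keys (l : List (List (String × Int))) :
    (PySem.Dict.mk (pvSpecList l)).keys = PySem.List.dedup (l.map pageOf) := by
  simp [pvSpecList, PySem.Dict.keys_mk, List.map_map, Function.comp_def]

theorem pvNodup (l : List (List (String × Int))) :
    ((PySem.Dict.mk (pvSpecList l)).keys).Nodup := by
  rw [pvSpecList_keys]
  simp only [PySem.List.dedup_eq_ofList]
  exact PySem.Set.nodup_ofList _

theorem pvContains (l : List (List (String × Int))) (p : Int) :
    (PySem.Dict.mk (pvSpecList l)).contains p = decide (p ∈ l.map pageOf) := by
  rw [PySem.Dict.contains_eq_decide_mem_keys, pvSpecList_keys]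
  simp

theorem pvGetD (l : List (List (String × Int))) (p : Int) (h : p ∈ l.map pageOf) :
    (PySem.Dict.mk (pvSpecList l)).getD p [] = l.filter (fun e => pageOf e == p) := by
  have hmem : (p, l.filter (fun e => pageOf e == p)) ∈ pvSpecList l :=
    List.mem_map_of_mem (by rw [PySem.List.mem_dedup]; exact h)
  exact PySem.Dict.getD_of_mem_items _ hmem (pvNodup l) []

theorem pvStepNew (l : List (List (String × Int))) (e : List (String × Int))
    (h : pageOf e ∉ l.map pageOf) :
    pvSpecList (l ++ [e]) = pvSpecList l ++ [(pageOf e, [e])] := by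
  unfold pvSpecList
  rw [List.map_append]
  simp only [List.map_cons, List.map_nil]
  rw [PySem.List.dedup_eq_ofList, PySem.List.dedup_eq_ofList,
      PySem.Set.ofList_append_singleton,
      PySem.Set.add_of_not_mem (by rw [PySem.Set.mem_ofList]; exact h)]
  rw [List.map_append]
  congr 1
  · apply List.map_congr_left
    intro q hq
    have hqmem : q ∈ l.map pageOf := by rwa [PySem.Set.mem_ofList] at hq
    have hne : (pageOf e == q) = false := by
      simp only [beq_eq_false_iff_ne]; rintro rfl; exact h hqmem
    simp [List.filter_append, hne]
  · have hnil : l.filter (fun e' => pageOf e' == pageOf e) = [] := by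
      rw [List.filter_eq_nil_iff]
      intro a ha
      simp only [beq_iff_eq] at *
      intro hc; exact h (hc ▸ List.mem_map_of_mem ha)
    simp [List.filter_append, hnil]

theorem pvStepOld (l : List (List (String × Int))) (e : List (String × Int))
    (h : pageOf e ∈ l.map pageOf) :
    pvSpecList (l ++ [e]) =
      (pvSpecList l).map (fun q => if q.1 == pageOf e then (pageOf e, l.filter (fun e' => pageOf e' == pageOf e) ++ [e]) else q) := by
  unfold pvSpecList
  rw [List.map_append]
  simp only [List.map_cons, List.map_nil]
  rw [PySem.List.dedup_eq_ofList, PySem.List.dedup_eq_ofList,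
      PySem.Set.ofList_append_singleton,
      PySem.Set.add_of_mem (by rw [PySem.Set.mem_ofList]; exact h)]
  rw [List.map_map]
  apply List.map_congr_left
  intro q hq
  by_cases hpq : q = pageOf e
  · subst hpq
    simp [List.filter_append]
  · have hne : (q == pageOf e) = false := beq_eq_false_iff_ne.mpr hpq
    have hne' : (pageOf e == q) = false := beq_eq_false_iff_ne.mpr (Ne.symm hpq)
    simp only [Function.comp_apply, List.filter_append, List.filter_cons, List.filter_nil,
      hne, hne', Bool.false_eq_true, if_false, List.append_nil]

theorem pvMain (l : List (List (String × Int))) :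
    l.foldl
      (fun grouped equation =>
        let page := pageOf equation
        let grouped := if grouped.contains page then grouped else grouped.insert page []
        grouped.modify page [] (fun acc => acc ++ [equation]))
      PySem.Dict.empty
    = PySem.Dict.mk (pvSpecList l) := by
  induction l using List.reverseRecOn with
  | nil => rfl
  | append_singleton l e ih =>
    rw [List.foldl_append, ih]
    simp only [List.foldl_cons, List.foldl_nil]
    by_cases h : pageOf e ∈ l.map pageOf
    · -- page already present: the insert branch is skipped, modify updates the entry in place
      have hc : (PySem.Dict.mk (pvSpecList l)).contains (pageOf e) = true := by
        rw [pvContains]; simpa using h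
      rw [pvStepOld l e h]
      simp only [hc, reduceIte, PySem.Dict.modify, pvGetD l _ h,
        PySem.Dict.insert, reduceIte]
    · -- new page: an empty entry is appended, then modify fills it
      have hc : (PySem.Dict.mk (pvSpecList l)).contains (pageOf e) = false := by
        rw [pvContains]; simpa using h
      rw [pvStepNew l e h]
      simp only [hc, Bool.false_eq_true, reduceIte, PySem.Dict.modify]
      have hi : (PySem.Dict.mk (pvSpecList l)).insert (pageOf e) [] =
          PySem.Dict.mk (pvSpecList l ++ [(pageOf e, [])]) :=
        congrArg PySem.Dict.mk (PySem.Dict.items_insert_of_not_contains _ _ hc)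
      rw [hi]
      have hk : (PySem.Dict.mk (pvSpecList l ++ [(pageOf e, [])])).keys =
          PySem.List.dedup (l.map pageOf) ++ [pageOf e] := by
        have h0 := pvSpecList_keys l
        rw [PySem.Dict.keys_mk] at h0 ⊢
        rw [List.map_append, h0]
        rfl
      have hnd : ((PySem.Dict.mk (pvSpecList l ++ [(pageOf e, [])])).keys).Nodup := by
        rw [hk]
        refine List.Nodup.append ?_ (List.nodup_singleton _) ?_
        · simp only [PySem.List.dedup_eq_ofList]; exact PySem.Set.nodup_ofList _
        · intro a ha hb
          rw [List.mem_singleton] at hb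
          subst hb
          exact h (by rwa [PySem.List.mem_dedup] at ha)
      have hgd : (PySem.Dict.mk (pvSpecList l ++ [(pageOf e, [])])).getD (pageOf e) [] = [] :=
        PySem.Dict.getD_of_mem_items _ (List.mem_append_right _ (List.mem_singleton_self _)) hnd []
      rw [hgd]
      have hc2 : (PySem.Dict.mk (pvSpecList l ++ [(pageOf e, [])])).contains (pageOf e) = true := by
        rw [PySem.Dict.contains_eq_decide_mem_keys, hk]
        simp
      refine Eq.trans (congrArg PySem.Dict.mk (PySem.Dict.items_insert_of_contains _ _ hc2)) ?_
      show PySem.Dict.mk _ = _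
      congr 1
      rw [List.map_append]
      congr 1
      · refine Eq.trans (List.map_congr_left ?_) (List.map_id _)
        intro x hx
        have hxk : x.1 ∈ PySem.List.dedup (l.map pageOf) := by
          have h0 := pvSpecList_keys l
          rw [PySem.Dict.keys_mk] at h0
          rw [← h0]
          exact List.mem_map_of_mem hx
        have : (x.1 == pageOf e) = false := by
          rw [beq_eq_false_iff_ne]
          intro hx1
          exact h (by rw [← hx1]; rwa [PySem.List.mem_dedup] at hxk)
        simp [this]
      · simp

-- ===== VERDICT (by name: the statement is the Claim_ definition above) =====
theorem group_by_page_spec : Claim_equal_group_by_page := by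
  intro equations _ _
  show _ = _
  unfold group_by_page group_by_page_alt
  rw [pvMain]
  rfl
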